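-- pv_equiv track=rewrite | github.com/halqin/py_practise | week082.py | frequencySequence
-- ===== SOURCE A (Python) =====
-- def increasing(seq):
-- 	for i in range(len(seq[:-1])):
-- 		if seq[i] > seq[i+1]:
-- 			return False
-- 	return True
--
-- def	frequencySequence(seq):
-- 	assert (increasing(seq)), "given sequence is not increasing"
-- 	resultList =[]
-- 	count = 0
-- 	for i in range(seq[-1]+1):
-- 		for j in seq:
-- 			if j < i+1:
-- 				count +=1
-- 		resultList.append(count)
-- 		count = 0
-- 	return resultList
-- ===== SOURCE B (Python) =====
-- def frequencySequence(seq):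
--     assert all(seq[k] <= seq[k + 1] for k in range(len(seq) - 1)), "given sequence is not increasing"
--     n = len(seq)
--     p = 0
--     resultList = []
--     for i in range(seq[-1] + 1):
--         while p < n and seq[p] <= i:
--             p += 1
--         resultList.append(p)
--     return resultList
-- ===== Notes on version B (the rewrite author's own statement) =====
-- stated objective: faster
-- what changed: Replaces the inner scan of the whole sequence for every i by a single pointer that advances monotonically through the (required-sorted) sequence, so each element is visited once across all iterations.
import Mathlib
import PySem

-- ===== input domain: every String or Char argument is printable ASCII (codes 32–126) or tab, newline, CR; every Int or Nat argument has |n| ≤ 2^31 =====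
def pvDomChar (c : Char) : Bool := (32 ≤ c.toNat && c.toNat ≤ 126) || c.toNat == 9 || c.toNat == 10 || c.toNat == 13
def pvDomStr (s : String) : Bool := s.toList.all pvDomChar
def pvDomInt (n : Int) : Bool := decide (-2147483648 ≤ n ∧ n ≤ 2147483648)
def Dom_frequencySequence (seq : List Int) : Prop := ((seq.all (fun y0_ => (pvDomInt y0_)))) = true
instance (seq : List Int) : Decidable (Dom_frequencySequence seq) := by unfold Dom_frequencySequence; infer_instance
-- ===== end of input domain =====

-- B replaces A's full rescan of seq for every i by a single pointer advancing once
-- through the (required-sorted) sequence: O(n+m) instead of O(n*m). Equivalence is on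
-- the return value; neither version mutates its argument.

-- ===== PORT A =====
-- A rescans the whole sequence for every i, counting elements < i+1 (count is reset
-- after each append). The assert on `increasing` and the seq[-1] on the empty list are
-- where A raises; Pre_ excludes exactly those inputs.
def frequencySequence (seq : List Int) : List Int :=
  (PySem.List.pyRange 0 (PySem.List.pyGetD seq (-1) 0 + 1) 1).foldl
    (fun resultList i =>
      resultList ++ [seq.foldl (fun count j => if j < i + 1 then count + 1 else count) (0 : Int)])
    []

-- ===== PORT B =====
-- the `while p < n and seq[p] <= i: p += 1` loop of Source B
def bAdvance (seq : List Int) (i : Int) (p : Nat) : Nat :=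
  if h : p < seq.length ∧ seq.getD p 0 ≤ i then bAdvance seq i (p + 1) else p
termination_by seq.length - p
decreasing_by omega

def frequencySequence_alt (seq : List Int) : List Int :=
  ((PySem.List.pyRange 0 (PySem.List.pyGetD seq (-1) 0 + 1) 1).foldl
    (fun (st : Nat × List Int) i =>
      let p := bAdvance seq i st.1
      (p, st.2 ++ [(p : Int)]))
    ((0 : Nat), ([] : List Int))).2

-- ===== PRECONDITION & SPEC =====
-- Pre_: exactly the inputs on which the Python A returns: a nonempty sequence (seq[-1]
-- raises IndexError on []) that is nondecreasing (the assert raises otherwise).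
def Pre_frequencySequence (seq : List Int) : Prop :=
  seq ≠ [] ∧ List.Pairwise (· ≤ ·) seq
instance (seq : List Int) : Decidable (Pre_frequencySequence seq) := by
  unfold Pre_frequencySequence; infer_instance

def pvWitness_frequencySequence : List Int := [-1, 2, 2, 4]

def Spec_frequencySequence (seq : List Int) (out : List Int) : Prop := out = frequencySequence_alt seq
instance (seq : List Int) (out : List Int) : Decidable (Spec_frequencySequence seq out) := by unfold Spec_frequencySequence; infer_instance

-- ===== CLAIM (what is proved, stated in full; the proofs are below) =====
def Claim_equal_frequencySequence : Prop := ∀ (seq : List Int), Dom_frequencySequence seq → Pre_frequencySequence seq → Spec_frequencySequence seq (frequencySequence seq)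

-- ===== LEMMAS AND PROOFS =====

-- every position strictly before the end of the takeWhile prefix satisfies the predicate
theorem tw_sat (l : List Int) (P : Int → Bool) (p : Nat)
    (hp : p < (l.takeWhile P).length) : P (l.getD p 0) = true := by
  induction l generalizing p with
  | nil => simp at hp
  | cons a t ih =>
    by_cases ha : P a
    · simp [ha] at hp
      cases p with
      | zero => simpa using ha
      | succ q => exact ih q (by omega)
    · simp [ha] at hp

-- the element just after the takeWhile prefix (if any) fails the predicate
theorem tw_stop (l : List Int) (P : Int → Bool)
    (hl : (l.takeWhile P).length < l.length) :
    P (l.getD (l.takeWhile P).length 0) = false := by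
  induction l with
  | nil => simp at hl
  | cons a t ih =>
    by_cases ha : P a
    · simp only [List.takeWhile_cons, ha, if_pos, List.length_cons] at hl ⊢
      simpa using ih (by simpa using hl)
    · simp [ha]

-- for a nondecreasing list, counting (· ≤ i) is the length of the takeWhile prefix
theorem count_eq_takeWhile (l : List Int) (i : Int) (hs : List.Pairwise (· ≤ ·) l) :
    l.countP (fun j => decide (j ≤ i)) = (l.takeWhile (fun j => decide (j ≤ i))).length := by
  induction l with
  | nil => simp
  | cons a t ih =>
    rcases List.pairwise_cons.mp hs with ⟨hall, ht⟩
    by_cases ha : a ≤ i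
    · rw [List.countP_cons_of_pos (by simpa using ha)]
      simp only [List.takeWhile_cons, decide_eq_true ha, if_pos, List.length_cons]
      have hih := ih ht
      omega
    · rw [List.countP_cons_of_neg (by simpa using ha)]
      have hz : t.countP (fun j => decide (j ≤ i)) = 0 :=
        List.countP_eq_zero.mpr (fun x hx => by
          have := hall x hx; simp only [decide_eq_true_eq]; omega)
      simp [ha, hz]

-- the pointer loop lands exactly on the takeWhile length whenever it starts at or before it
theorem bAdvance_eq (seq : List Int) (i : Int) (p : Nat)
    (hp : p ≤ (seq.takeWhile (fun j => decide (j ≤ i))).length) :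
    bAdvance seq i p = (seq.takeWhile (fun j => decide (j ≤ i))).length := by
  have hle : (seq.takeWhile (fun j => decide (j ≤ i))).length ≤ seq.length :=
    (List.takeWhile_sublist _).length_le
  rw [bAdvance]
  rcases Nat.lt_or_ge p (seq.takeWhile (fun j => decide (j ≤ i))).length with h | h
  · have hsat := tw_sat seq _ p h
    rw [dif_pos ⟨by omega, by simpa using hsat⟩]
    exact bAdvance_eq seq i (p + 1) (by omega)
  · have hpt : p = (seq.takeWhile (fun j => decide (j ≤ i))).length := by omega
    subst hpt
    rcases Nat.lt_or_ge (seq.takeWhile (fun j => decide (j ≤ i))).length seq.length with hlt | hge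
    · have hstop := tw_stop seq _ hlt
      rw [dif_neg]
      rintro ⟨-, hle'⟩
      exact absurd hle' (of_decide_eq_false hstop)
    · rw [dif_neg]; rintro ⟨hlt', -⟩; omega
termination_by (seq.takeWhile (fun j => decide (j ≤ i))).length - p

-- counting (· ≤ i) is monotone in i
theorem count_mono (l : List Int) (i i' : Int) (h : i ≤ i') :
    l.countP (fun j => decide (j ≤ i)) ≤ l.countP (fun j => decide (j ≤ i')) :=
  List.countP_mono_left (fun x _ hx => by
    simp only [decide_eq_true_eq] at hx ⊢; omega)

-- the B loop over range(m): the pointer is always the running count, and the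
-- accumulated list is the list of counts
theorem loopB (seq : List Int) (hs : List.Pairwise (· ≤ ·) seq) (m : Nat) :
    ((PySem.List.pyRange 0 (m : Int) 1).foldl
      (fun (st : Nat × List Int) i =>
        let p := bAdvance seq i st.1
        (p, st.2 ++ [(p : Int)]))
      ((0 : Nat), ([] : List Int))).1 ≤ seq.countP (fun j => decide (j ≤ (m : Int))) ∧
    ((PySem.List.pyRange 0 (m : Int) 1).foldl
      (fun (st : Nat × List Int) i =>
        let p := bAdvance seq i st.1
        (p, st.2 ++ [(p : Int)]))
      ((0 : Nat), ([] : List Int))).2 =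
      (List.range m).map (fun k : Nat => (seq.countP (fun j => decide (j ≤ (k : Int))) : Int)) := by
  induction m with
  | zero => simp [PySem.List.pyRange_one_eq_nil]
  | succ m ih =>
    have hsplit : PySem.List.pyRange 0 ((m + 1 : Nat) : Int) 1
        = PySem.List.pyRange 0 (m : Int) 1 ++ [(m : Int)] := by
      push_cast
      exact PySem.List.pyRange_one_succ_right (by positivity)
    rw [hsplit, List.foldl_append]
    obtain ⟨ih1, ih2⟩ := ih
    have hstep : bAdvance seq (m : Int)
        ((PySem.List.pyRange 0 (m : Int) 1).foldl
          (fun (st : Nat × List Int) i =>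
            let p := bAdvance seq i st.1
            (p, st.2 ++ [(p : Int)]))
          ((0 : Nat), ([] : List Int))).1
        = seq.countP (fun j => decide (j ≤ (m : Int))) := by
      rw [bAdvance_eq seq (m : Int) _
        (by rw [← count_eq_takeWhile seq _ hs]; exact ih1)]
      exact (count_eq_takeWhile seq _ hs).symm
    refine ⟨?_, ?_⟩
    · simp only [List.foldl_cons, List.foldl_nil, hstep]
      exact count_mono seq _ _ (by push_cast; omega)
    · simp only [List.foldl_cons, List.foldl_nil, hstep, ih2, List.range_succ, List.map_append,
        List.map_cons, List.map_nil]

-- A's inner scan is the count of elements ≤ i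
theorem innerA (seq : List Int) (i : Int) :
    seq.foldl (fun count j => if j < i + 1 then count + 1 else count) (0 : Int)
      = (seq.countP (fun j => decide (j ≤ i)) : Int) := by
  rw [PySem.List.foldl_ite_add_one]
  have : seq.countP (fun j => decide (j < i + 1)) = seq.countP (fun j => decide (j ≤ i)) := by
    apply List.countP_congr
    intro x _
    simp only [decide_eq_true_eq]
    omega
  rw [this]
  ring

-- ===== VERDICT (by name: the statement is the Claim_ definition above) =====
theorem frequencySequence_spec : Claim_equal_frequencySequence := by
  intro seq _ ⟨hne, hs⟩
  unfold Spec_frequencySequence frequencySequence frequencySequence_alt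
  set L : Int := PySem.List.pyGetD seq (-1) 0 + 1 with hL
  by_cases hle : L ≤ 0
  · rw [PySem.List.pyRange_one_eq_nil hle]
    simp
  · have hpos : 0 < L := by omega
    have hm : ((L.toNat : Nat) : Int) = L := Int.toNat_of_nonneg (by omega)
    rw [← hm, (loopB seq hs L.toNat).2,
      PySem.List.foldl_append_singleton_eq_map, PySem.List.pyRange_zero_nat,
      List.map_map, List.nil_append]
    apply List.map_congr_left
    intro k _
    exact innerA seq (k : Int)
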